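-- pv_equiv track=rewrite | github.com/Rpal1315/school | Class12/assignments/specialPalindrome.py | sp_palindrome
-- ===== SOURCE A (Python) =====
-- def sp_palindrome(num_list):
--     out_list = []
--     for num in num_list:
--         num_str = str(num)
--         counter = 0
--         chkID = (len(num_str) // 2)
--         for i in range(0, len(num_str)):
--             for j in range(i + 1, len(num_str)):
--                 if num_str[i] == num_str[j]:
--                     counter += 1
--
--         if counter == chkID:
--             out_list.append(num)
--
--     return out_list
-- ===== SOURCE B (Python) =====
-- def sp_palindrome(num_list):
--     out_list = []
--     for num in num_list:
--         num_str = str(num)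
--         freq = {}
--         for ch in num_str:
--             freq[ch] = freq.get(ch, 0) + 1
--         pairs = 0
--         for c in freq.values():
--             pairs += c * (c - 1) // 2
--         if pairs == len(num_str) // 2:
--             out_list.append(num)
--     return out_list
-- ===== Notes on version B (the rewrite author's own statement) =====
-- stated objective: alternative
-- what changed: Replaces the O(L^2) all-pairs scan over each number's digit string by a single frequency-count pass summing c*(c-1)//2 over the digit counts (digit strings are short, so measured speed is similar).
import Mathlib
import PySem

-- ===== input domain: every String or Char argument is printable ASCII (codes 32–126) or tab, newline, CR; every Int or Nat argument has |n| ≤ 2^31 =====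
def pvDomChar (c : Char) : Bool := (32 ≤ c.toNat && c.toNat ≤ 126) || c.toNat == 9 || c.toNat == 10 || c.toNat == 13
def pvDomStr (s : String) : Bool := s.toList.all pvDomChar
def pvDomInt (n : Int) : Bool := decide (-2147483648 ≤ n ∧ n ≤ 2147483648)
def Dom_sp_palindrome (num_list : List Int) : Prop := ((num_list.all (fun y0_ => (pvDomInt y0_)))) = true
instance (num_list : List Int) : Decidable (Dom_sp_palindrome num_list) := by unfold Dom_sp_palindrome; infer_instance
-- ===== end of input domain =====

-- B replaces A's all-pairs digit scan per number by one frequency-count pass summing c*(c-1)//2 (objective: alternative).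

-- ===== PORT A =====
-- literal port of A; the string indices i, j are always in range, so pyGetD's default ' ' is never read
def sp_palindrome (num_list : List Int) : List Int :=
  num_list.foldl (fun out_list num =>
    let num_str := PySem.Int.toChars num
    let chkID := PySem.Int.floordiv (PySem.List.len num_str) 2
    let counter :=
      (PySem.List.pyRange 0 (PySem.List.len num_str)).foldl (fun counter i =>
        (PySem.List.pyRange (i + 1) (PySem.List.len num_str)).foldl (fun counter j =>
          if PySem.List.pyGetD num_str i ' ' == PySem.List.pyGetD num_str j ' ' then counter + 1
          else counter) counter) (0 : Int)
    if counter == chkID then out_list ++ [num] else out_list) []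

-- ===== PORT B =====
def sp_palindrome_alt (num_list : List Int) : List Int :=
  num_list.foldl (fun out_list num =>
    let num_str := PySem.Int.toChars num
    let freq := num_str.foldl (fun d ch => d.insert ch (d.getD ch 0 + 1))
      (PySem.Dict.empty : PySem.Dict Char Int)
    let pairs := freq.values.foldl (fun pairs c => pairs + PySem.Int.floordiv (c * (c - 1)) 2) (0 : Int)
    if pairs == PySem.Int.floordiv (PySem.List.len num_str) 2 then out_list ++ [num] else out_list) []

-- ===== PRECONDITION & SPEC =====
def Spec_sp_palindrome (num_list : List Int) (out : List Int) : Prop := out = sp_palindrome_alt num_list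
instance (num_list : List Int) (out : List Int) : Decidable (Spec_sp_palindrome num_list out) := by unfold Spec_sp_palindrome; infer_instance

-- ===== CLAIM (what is proved, stated in full; the proofs are below) =====
def Claim_equal_sp_palindrome : Prop := ∀ (num_list : List Int), Dom_sp_palindrome num_list → Spec_sp_palindrome num_list (sp_palindrome num_list)

-- ===== LEMMAS AND PROOFS =====

lemma pyRange_nil (a b : Int) (h : b ≤ a) : PySem.List.pyRange a b = [] := by
  simp [PySem.List.pyRange]; omega

lemma map_getD_pyRange (s : List Char) (d : Char) :
    ∀ (k a : Nat), s.length - a ≤ k →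
    (PySem.List.pyRange (a : Int) (PySem.List.len s)).map (fun j => PySem.List.pyGetD s j d)
      = s.drop a := by
  intro k
  induction k with
  | zero =>
    intro a h
    rw [pyRange_nil]
    · rw [List.drop_eq_nil_of_le (by omega), List.map_nil]
    · simp [PySem.List.len]; omega
  | succ k ih =>
    intro a h
    by_cases hl : a < s.length
    · rw [PySem.List.pyRange_one_cons (by simp [PySem.List.len]; exact_mod_cast hl)]
      have : ((a : Int) + 1) = ((a + 1 : Nat) : Int) := by push_cast; ring
      rw [List.map_cons, this, ih (a + 1) (by omega)]
      rw [PySem.List.pyGetD_eq_getElem s d (by positivity) (by exact_mod_cast hl)]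
      rw [List.drop_eq_getElem_cons hl]
      simp
    · rw [pyRange_nil _ _ (by simp [PySem.List.len]; omega),
        List.drop_eq_nil_of_le (by omega), List.map_nil]

lemma innerA (s : List Char) (x d : Char) (a : Nat) (acc : Int) :
    (PySem.List.pyRange ((a : Nat) : Int) (PySem.List.len s)).foldl
        (fun c j => if x == PySem.List.pyGetD s j d then c + 1 else c) acc
      = acc + ((s.drop a).count x : Int) := by
  rw [PySem.List.foldl_count_if (fun j => x == PySem.List.pyGetD s j d)]
  congr 1
  rw [← map_getD_pyRange s d (s.length) a (by omega), List.count, List.countP_map]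
  congr 1
  apply List.countP_congr
  intro y _
  simp [BEq.comm]

def pairsTail : List Char → Nat
  | [] => 0
  | c :: t => t.count c + pairsTail t

lemma sum_drop_count (s : List Char) :
    ((List.range s.length).map (fun i => (s.drop (i+1)).count (s.getD i ' '))).sum = pairsTail s := by
  induction s with
  | nil => simp [pairsTail]
  | cons c t ih =>
    rw [List.length_cons, List.range_succ_eq_map, List.map_cons, List.map_map, List.sum_cons]
    simp only [Function.comp_def, List.getD_cons_succ, List.drop_succ_cons, List.getD_cons_zero]
    rw [ih, pairsTail]
    simp

lemma pairsA_eq (s : List Char) :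
    (PySem.List.pyRange 0 (PySem.List.len s)).foldl (fun counter i =>
        (PySem.List.pyRange (i + 1) (PySem.List.len s)).foldl (fun counter j =>
          if PySem.List.pyGetD s i ' ' == PySem.List.pyGetD s j ' ' then counter + 1
          else counter) counter) (0 : Int)
      = (pairsTail s : Int) := by
  have hlen : PySem.List.len s = ((s.length : Nat) : Int) := rfl
  rw [hlen, PySem.List.pyRange_zero_natCast]
  rw [PySem.List.foldl_congr_mem _ _
      (fun acc i => acc + ((s.drop (i.toNat + 1)).count (s.getD i.toNat ' ') : Int)) 0 ?_]
  · rw [PySem.List.foldl_add, List.map_map]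
    rw [← sum_drop_count s]
    simp [Function.comp_def]
  · intro acc i hi
    simp only [List.mem_map, List.mem_range] at hi
    obtain ⟨k, hk, rfl⟩ := hi
    have h1 : ((k : Int) + 1) = (((k + 1 : Nat)) : Int) := by push_cast; ring
    rw [h1, ← hlen, innerA s _ ' ' (k + 1) acc]
    rw [PySem.List.pyGetD_natCast]
    simp

def cntItems (l : List Char) : List (Char × Int) :=
  (PySem.List.dedup l).map (fun c => (c, (l.count c : Int)))

lemma find_map_key (ks : List Char) (h : Char → Int) (x : Char) :
    List.find? (fun p => p.1 == x) (ks.map (fun c => (c, h c)))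
      = if x ∈ ks then some (x, h x) else none := by
  induction ks with
  | nil => simp
  | cons c t ih =>
    by_cases hc : c = x
    · subst hc; simp
    · simp [List.mem_cons, Ne.symm hc, ih, show (c == x) = false by simp [hc]]

lemma dedup_append (p : List Char) (x : Char) :
    PySem.List.dedup (p ++ [x]) =
      if x ∈ p then PySem.List.dedup p else PySem.List.dedup p ++ [x] := by
  show PySem.Set.ofList (p ++ [x]) = _
  rw [PySem.Set.ofList, List.foldl_append]
  show PySem.Set.add (PySem.Set.ofList p) x = _
  rw [PySem.Set.add]
  by_cases hx : x ∈ p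
  · rw [if_pos hx, if_pos (by simp [PySem.Set.mem_ofList, hx])]
    rfl
  · rw [if_neg (by simp [PySem.Set.mem_ofList, hx]), if_neg hx]
    rfl

lemma getD_cntItems (l : List Char) (x : Char) :
    (PySem.Dict.mk (cntItems l)).getD x 0 = (l.count x : Int) := by
  rw [PySem.Dict.getD, PySem.Dict.get?, cntItems, find_map_key]
  by_cases hx : x ∈ l
  · rw [if_pos (by rw [PySem.List.dedup, PySem.Set.mem_ofList]; exact hx)]; rfl
  · rw [if_neg (by rw [PySem.List.dedup, PySem.Set.mem_ofList]; exact hx)]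
    simp [List.count_eq_zero_of_not_mem hx]

lemma insert_cnt (p : List Char) (x : Char) :
    (PySem.Dict.mk (cntItems p)).insert x ((PySem.Dict.mk (cntItems p)).getD x 0 + 1)
      = PySem.Dict.mk (cntItems (p ++ [x])) := by
  rw [getD_cntItems, PySem.Dict.insert]
  have hmem : ∀ c, c ∈ PySem.List.dedup p ↔ c ∈ p := fun c => PySem.Set.mem_ofList p c
  by_cases hx : x ∈ p
  · rw [if_pos ?_]
    · congr 1
      rw [cntItems, cntItems, dedup_append, if_pos hx, List.map_map]
      apply List.map_congr_left
      intro c _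
      by_cases hcx : c = x
      · subst hcx
        simp [List.count_append]
      · simp [hcx, List.count_append, Ne.symm hcx]
    · show (PySem.Dict.mk (cntItems p)).contains x = true
      rw [PySem.Dict.contains]
      simp only [cntItems, List.any_map, List.any_eq_true, Function.comp_def, beq_iff_eq]
      exact ⟨x, (hmem x).mpr hx, rfl⟩
  · rw [if_neg ?_]
    · congr 1
      rw [cntItems, cntItems, dedup_append, if_neg hx, List.map_append]
      congr 1
      · apply List.map_congr_left
        intro c hc
        have : c ≠ x := fun h => hx (h ▸ (hmem c).mp hc)
        simp [List.count_append, Ne.symm this]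
      · simp [List.count_append, List.count_eq_zero_of_not_mem hx]
    · show ¬ (PySem.Dict.mk (cntItems p)).contains x = true
      rw [PySem.Dict.contains]
      simp only [cntItems, List.any_map, List.any_eq_true, Function.comp_def, beq_iff_eq]
      rintro ⟨c, hc, rfl⟩
      exact hx ((hmem c).mp hc)

lemma freq_items : ∀ (l p : List Char),
    (l.foldl (fun d ch => d.insert ch (d.getD ch 0 + 1)) (PySem.Dict.mk (cntItems p)))
      = PySem.Dict.mk (cntItems (p ++ l)) := by
  intro l
  induction l with
  | nil => intro p; simp
  | cons x t ih =>
    intro p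
    rw [List.foldl_cons, insert_cnt, ih (p ++ [x])]
    simp

lemma pairsTail_append (p : List Char) (x : Char) :
    pairsTail (p ++ [x]) = pairsTail p + p.count x := by
  induction p with
  | nil => simp [pairsTail]
  | cons c t ih =>
    simp only [List.cons_append, pairsTail, ih, List.count_append, List.count_cons,
      List.count_nil]
    by_cases h : c = x
    · subst h; simp; omega
    · simp [h, Ne.symm h]; omega

lemma sum_map_update (ks : List Char) (hk : ks.Nodup) (f f' : Char → Nat) (x : Char) (m : Nat)
    (hne : ∀ c, c ≠ x → f' c = f c) (hfx : f' x = f x + m) (hmem : x ∈ ks) :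
    (ks.map f').sum = (ks.map f).sum + m := by
  induction ks with
  | nil => simp at hmem
  | cons c t ih =>
    rcases List.nodup_cons.mp hk with ⟨hct, ht⟩
    by_cases h : c = x
    · subst h
      have : t.map f' = t.map f := List.map_congr_left fun d hd => hne d (fun e => hct (e ▸ hd))
      simp [this, hfx]; omega
    · have hx : x ∈ t := by rcases List.mem_cons.mp hmem with h' | h' ; exact absurd h'.symm h; exact h'
      simp [hne c h, ih ht hx]; omega

lemma g_succ (k : Nat) : (k + 1) * k / 2 = k * (k - 1) / 2 + k := by
  cases k with
  | zero => rfl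
  | succ n =>
    have h : (n + 2) * (n + 1) = (n + 1) * n + (n + 1) * 2 := by ring
    rw [Nat.add_sub_cancel, h, Nat.add_mul_div_right _ _ (by norm_num)]

lemma choose_sum (l : List Char) :
    (((PySem.List.dedup l).map (fun c => l.count c * (l.count c - 1) / 2)).sum) = pairsTail l := by
  induction l using List.reverseRecOn with
  | nil => simp [PySem.List.dedup, PySem.Set.ofList, PySem.Set.empty, pairsTail]
  | append_singleton p x ih =>
    rw [pairsTail_append, dedup_append]
    by_cases hx : x ∈ p
    · rw [if_pos hx, ← ih]
      apply sum_map_update _ (PySem.Set.nodup_ofList p) _ _ x (p.count x)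
      · intro c hc
        simp [List.count_append, Ne.symm hc]
      · simp [List.count_append, g_succ]
      · exact (PySem.Set.mem_ofList p x).mpr hx
    · rw [if_neg hx, List.map_append, List.sum_append, ← ih]
      have h1 : ∀ c ∈ PySem.List.dedup p,
          (p ++ [x]).count c * ((p ++ [x]).count c - 1) / 2 = p.count c * (p.count c - 1) / 2 := by
        intro c hc
        have : c ≠ x := fun e => hx (e ▸ ((PySem.Set.mem_ofList p c).mp hc))
        simp [List.count_append, Ne.symm this]
      rw [List.map_congr_left h1]
      simp [List.count_append, List.count_eq_zero_of_not_mem hx]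

lemma g_cast (k : Nat) :
    PySem.Int.floordiv ((k : Int) * ((k : Int) - 1)) 2 = ((k * (k - 1) / 2 : Nat) : Int) := by
  cases k with
  | zero => decide
  | succ n =>
    have h : ((n + 1 : Nat) : Int) * (((n + 1 : Nat) : Int) - 1) = (((n + 1) * n : Nat) : Int) := by
      push_cast; ring
    rw [h, Nat.add_sub_cancel]
    exact_mod_cast PySem.Int.floordiv_natCast ((n + 1) * n) 2

lemma pairsB_eq (l : List Char) :
    ((l.foldl (fun d ch => d.insert ch (d.getD ch 0 + 1))
        (PySem.Dict.empty : PySem.Dict Char Int)).values.foldl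
      (fun pairs c => pairs + PySem.Int.floordiv (c * (c - 1)) 2) (0 : Int))
      = (pairsTail l : Int) := by
  have he : (PySem.Dict.empty : PySem.Dict Char Int) = PySem.Dict.mk (cntItems []) := rfl
  rw [he, freq_items l [], List.nil_append]
  rw [PySem.List.foldl_add, PySem.Dict.values, List.map_map, cntItems, List.map_map]
  have : ((PySem.List.dedup l).map
        (((fun c => PySem.Int.floordiv (c * (c - 1)) 2) ∘ (fun x => x.2)) ∘ fun c => (c, (l.count c : Int))))
      = (PySem.List.dedup l).map (fun c => ((l.count c * (l.count c - 1) / 2 : Nat) : Int)) := by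
    apply List.map_congr_left
    intro c _
    exact g_cast (l.count c)
  rw [this, ← choose_sum l, Nat.cast_list_sum, List.map_map]
  simp [Function.comp_def]

-- ===== VERDICT (by name: the statement is the Claim_ definition above) =====
theorem sp_palindrome_spec : Claim_equal_sp_palindrome := by
  intro num_list _
  show sp_palindrome num_list = sp_palindrome_alt num_list
  unfold sp_palindrome sp_palindrome_alt
  apply PySem.List.foldl_congr_mem
  intro acc num _
  simp only [pairsA_eq (PySem.Int.toChars num), pairsB_eq (PySem.Int.toChars num)]
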